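-- pv_equiv track=rewrite | github.com/Arsen1302/Code-copy-detector | TestData/solutions/problem_1655_2.py | solution_1655_2
-- ===== SOURCE A (Python) =====
-- from typing import List
--
-- def solution_1655_2(nums: List[int]) -> bool:
--
-- 	dictionary = {}
--
-- 	for i in range(len(nums) - 1):
--
-- 		subarray_sum = sum(nums[i:i+2])
--
-- 		if subarray_sum not in dictionary:
--
-- 			dictionary[subarray_sum] = nums[i:i+2]
-- 		else:
-- 			return True
--
-- 	return False
-- ===== SOURCE B (Python) =====
-- from typing import List
--
-- def solution_1655_2(nums: List[int]) -> bool: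
--     sums = sorted(a + b for a, b in zip(nums, nums[1:]))
--     return any(x == y for x, y in zip(sums, sums[1:]))
-- ===== Notes on version B (the rewrite author's own statement) =====
-- stated objective: alternative
-- what changed: Replaces the dict-based early-return index loop (hash-set collision detection over slice sums) by building the adjacent-pair-sum list with zip, sorting it, and scanning once for two equal neighbours.
import Mathlib
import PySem

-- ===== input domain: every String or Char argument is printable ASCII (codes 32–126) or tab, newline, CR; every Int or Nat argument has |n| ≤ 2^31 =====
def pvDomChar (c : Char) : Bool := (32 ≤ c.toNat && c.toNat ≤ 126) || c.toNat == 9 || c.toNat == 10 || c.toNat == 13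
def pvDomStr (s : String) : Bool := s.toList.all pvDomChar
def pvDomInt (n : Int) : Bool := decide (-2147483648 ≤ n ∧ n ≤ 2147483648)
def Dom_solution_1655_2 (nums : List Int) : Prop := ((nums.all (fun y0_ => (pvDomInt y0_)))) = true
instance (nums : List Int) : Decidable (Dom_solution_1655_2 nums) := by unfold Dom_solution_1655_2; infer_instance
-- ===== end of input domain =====

-- B replaces A's dict-based early-return loop by sort-the-pair-sums then one adjacent-equality scan (alternative algorithm, not claimed faster).


-- ===== PORT A =====
-- the for-loop over range(len(nums)-1) with the dict and the early 'return True'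
def solutionLoopA (nums : List Int) : List Int → PySem.Dict Int (List Int) → Bool
  | [], _ => false
  | i :: rest, d =>
    let subarray_sum := (PySem.List.slice nums (some i) (some (i + 2))).sum
    if d.contains subarray_sum = false then
      solutionLoopA nums rest (d.insert subarray_sum (PySem.List.slice nums (some i) (some (i + 2))))
    else true

def solution_1655_2 (nums : List Int) : Bool :=
  solutionLoopA nums (PySem.List.pyRange 0 ((nums.length : Int) - 1) 1) PySem.Dict.empty

-- ===== PORT B =====
def solution_1655_2_alt (nums : List Int) : Bool :=
  let sums := PySem.List.sorted
    (List.zipWith (· + ·) nums (PySem.List.slice nums (some 1) none)) (fun x => x) false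
  (List.zipWith (fun x y => x == y) sums (PySem.List.slice sums (some 1) none)).any id

-- ===== PRECONDITION & SPEC =====
def Spec_solution_1655_2 (nums : List Int) (out : Bool) : Prop := out = solution_1655_2_alt nums
instance (nums : List Int) (out : Bool) : Decidable (Spec_solution_1655_2 nums out) := by unfold Spec_solution_1655_2; infer_instance

-- ===== CLAIM (what is proved, stated in full; the proofs are below) =====
def Claim_equal_solution_1655_2 : Prop := ∀ (nums : List Int), Dom_solution_1655_2 nums → Spec_solution_1655_2 nums (solution_1655_2 nums)

-- ===== LEMMAS AND PROOFS =====

-- A's loop returns False exactly when the pair sums of the remaining indices, together with the keys already seen, are all distinct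
theorem loopA_false_iff (nums : List Int) :
    ∀ (is : List Int) (d : PySem.Dict Int (List Int)), d.keys.Nodup →
      (solutionLoopA nums is d = false ↔
        (d.keys ++ is.map (fun i => (PySem.List.slice nums (some i) (some (i + 2))).sum)).Nodup) := by
  intro is
  induction is with
  | nil => intro d h; simpa [solutionLoopA] using h
  | cons i rest ih =>
    intro d h
    by_cases hc : d.contains ((PySem.List.slice nums (some i) (some (i + 2))).sum) = false
    · have hnd : (d.insert ((PySem.List.slice nums (some i) (some (i + 2))).sum)
          (PySem.List.slice nums (some i) (some (i + 2)))).keys.Nodup :=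
        PySem.Dict.nodup_keys_insert _ _ _ h
      have hkeys := PySem.Dict.keys_insert_of_not_contains d
          (PySem.List.slice nums (some i) (some (i + 2))) hc
      rw [show solutionLoopA nums (i :: rest) d =
          solutionLoopA nums rest (d.insert ((PySem.List.slice nums (some i) (some (i + 2))).sum)
            (PySem.List.slice nums (some i) (some (i + 2)))) by simp [solutionLoopA, hc]]
      rw [ih _ hnd, hkeys]
      simp [List.append_assoc]
    · have hmem : ((PySem.List.slice nums (some i) (some (i + 2))).sum) ∈ d.keys := by
        rw [← PySem.Dict.contains_iff_mem_keys]
        simpa using hc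
      constructor
      · intro hfalse
        exfalso
        simp [solutionLoopA, hc] at hfalse
      · intro hnodup
        exfalso
        rw [List.map_cons, List.nodup_append] at hnodup
        exact hnodup.2.2 _ hmem _ (by simp) rfl

-- the pair sums A computes via slices are the zipWith-pair sums B builds
theorem sums_bridge (nums : List Int) :
    (PySem.List.pyRange 0 ((nums.length : Int) - 1) 1).map
        (fun i => (PySem.List.slice nums (some i) (some (i + 2))).sum) =
      List.zipWith (· + ·) nums nums.tail := by
  apply List.ext_getElem
  · simp only [List.length_map, PySem.List.length_pyRange_one, List.length_zipWith,
      List.length_tail]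
    omega
  · intro k h1 h2
    have hk : k < nums.length - 1 := by
      simp [PySem.List.length_pyRange_one] at h1; omega
    have hk1 : k + 1 < nums.length := by omega
    have hk0 : k < nums.length := by omega
    rw [List.getElem_map, PySem.List.getElem_pyRange_one, List.getElem_zipWith]
    have hz : (0 : Int) + (k : Int) = ((k : Nat) : Int) := by ring
    rw [hz]
    have hs : PySem.List.slice nums (some ((k : Nat) : Int)) (some (((k : Nat) : Int) + ((2 : Nat) : Int))) =
        (nums.drop k).take 2 := PySem.List.slice_natCast_add nums k 2
    have h2' : (((k : Nat) : Int) + ((2 : Nat) : Int)) = ((k : Nat) : Int) + 2 := by push_cast; ring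
    rw [h2'] at hs
    rw [hs]
    have hdrop : nums.drop k = nums[k] :: nums.drop (k + 1) := List.drop_eq_getElem_cons hk0
    have hdrop1 : nums.drop (k + 1) = nums[k + 1] :: nums.drop (k + 2) := List.drop_eq_getElem_cons hk1
    rw [hdrop, hdrop1, List.getElem_tail]
    simp only [List.take_succ_cons, List.take_zero, List.sum_cons, List.sum_nil, add_zero]

-- a ≤-sorted list has no adjacent equal pair exactly when it has no duplicates at all
theorem adj_false_iff_nodup :
    ∀ (s : List Int), s.Pairwise (· ≤ ·) →
      ((List.zipWith (fun x y => x == y) s s.tail).any id = false ↔ s.Nodup) := by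
  intro s
  induction s with
  | nil => simp
  | cons a t ih =>
    intro hp
    cases t with
    | nil => simp
    | cons b u =>
      have hab : a ≤ b := (List.pairwise_cons.mp hp).1 b (by simp)
      have hbu : ∀ x ∈ u, b ≤ x := fun x hx =>
        (List.pairwise_cons.mp (List.pairwise_cons.mp hp).2).1 x hx
      have htp : (b :: u).Pairwise (· ≤ ·) := (List.pairwise_cons.mp hp).2
      rw [show (List.zipWith (fun x y => x == y) (a :: b :: u) (a :: b :: u).tail).any id =
          ((a == b) || (List.zipWith (fun x y => x == y) (b :: u) (b :: u).tail).any id) by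
        simp]
      rw [Bool.or_eq_false_iff, ih htp]
      constructor
      · rintro ⟨hne, hnd⟩
        have hane : a ≠ b := by simpa using hne
        refine List.nodup_cons.mpr ⟨?_, hnd⟩
        intro hmem
        rcases List.mem_cons.mp hmem with h | h
        · exact hane h
        · have : b ≤ a := hbu a h
          exact hane (le_antisymm hab this)
      · intro hnd
        rcases List.nodup_cons.mp hnd with ⟨hnotmem, hnd'⟩
        refine ⟨?_, hnd'⟩
        simp only [beq_eq_false_iff_ne, ne_eq]
        intro h; exact hnotmem (h ▸ List.mem_cons_self)

theorem alt_false_iff (nums : List Int) :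
    (solution_1655_2_alt nums = false ↔ (List.zipWith (· + ·) nums nums.tail).Nodup) := by
  simp only [solution_1655_2_alt, PySem.List.slice_from_one]
  have hpair : (PySem.List.sorted (List.zipWith (· + ·) nums nums.tail) (fun x => x) false).Pairwise
      (· ≤ ·) := by
    simpa using PySem.List.sorted_pairwise (List.zipWith (· + ·) nums nums.tail) (fun x => x)
  rw [adj_false_iff_nodup _ hpair]
  exact (PySem.List.sorted_perm (List.zipWith (· + ·) nums nums.tail) (fun x => x) false).nodup_iff

-- ===== VERDICT (by name: the statement is the Claim_ definition above) =====
theorem solution_1655_2_spec : Claim_equal_solution_1655_2 := by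
  intro nums _
  unfold Spec_solution_1655_2
  have hA : solution_1655_2 nums = false ↔ (List.zipWith (· + ·) nums nums.tail).Nodup := by
    unfold solution_1655_2
    rw [loopA_false_iff nums _ PySem.Dict.empty PySem.Dict.nodup_keys_empty]
    rw [PySem.Dict.keys_empty, List.nil_append, sums_bridge]
  have hB := alt_false_iff nums
  rw [Bool.eq_iff_iff]
  constructor
  · intro h
    by_contra hb
    have hb' : solution_1655_2_alt nums = false := by simpa using hb
    have := hB.mp hb'
    have := hA.mpr this
    rw [this] at h; exact Bool.false_ne_true h
  · intro h
    by_contra ha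
    have ha' : solution_1655_2 nums = false := by simpa using ha
    have := hA.mp ha'
    have := hB.mpr this
    rw [this] at h; exact Bool.false_ne_true h
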